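-- pv_equiv track=rewrite | github.com/MichalMarsalek/Advent-of-code | 2020/Python/day4.py | solve
-- ===== SOURCE A (Python) =====
-- def passport(data):
--     res = {}
--     for entry in data.replace("\n", " ").split():
--         k,v = entry.split(":")
--         res[k] = v
--     return res
--
-- def inrange(value, lo, hi):
--     return value.isnumeric() and lo <= int(value) <= hi
--
-- def solve(inp):
--     fields = ["byr", "iyr", "eyr", "hgt", "hcl", "ecl", "pid"]
--     passports = [passport(x) for x in inp.split("\n\n")]
--
--     def check1(passport):
--         return all(field in passport for field in fields)
--     part1 = sum(check1(x) for x in passports)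
--
--     def check2(entry):
--         policies = [
--             inrange(entry["byr"], 1920, 2002),
--             inrange(entry["iyr"], 2010, 2020),
--             inrange(entry["eyr"], 2020, 2030),
--             (entry["hgt"][-2:] == "cm" and inrange(entry["hgt"][:-2], 150, 193)) or (entry["hgt"][-2:] == "in" and inrange(entry["hgt"][:-2], 59, 76)),
--             entry["hcl"][0] == "#",
--             len(entry["hcl"]) == 7,
--             set(entry["hcl"]) <= set("#0123456789abcdef"),
--             entry["ecl"] in "amb blu brn gry grn hzl oth".split(),
--             len(entry["pid"]) == 9,
--             set(entry["pid"]) <= set("0123456789")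
--         ]
--         return all(policies)
--     part2 = sum(check1(x) and check2(x) for x in passports)
--     return part1, part2
-- ===== SOURCE B (Python) =====
-- FIELDS = ("byr", "iyr", "eyr", "hgt", "hcl", "ecl", "pid")
--
-- def _year(v, lo, hi):
--     return v.isnumeric() and lo <= int(v) <= hi
--
-- def _valid(k, v):
--     if k == "byr":
--         return _year(v, 1920, 2002)
--     if k == "iyr":
--         return _year(v, 2010, 2020)
--     if k == "eyr":
--         return _year(v, 2020, 2030)
--     if k == "hgt":
--         return (v[-2:] == "cm" and _year(v[:-2], 150, 193)) or (v[-2:] == "in" and _year(v[:-2], 59, 76))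
--     if k == "hcl":
--         return len(v) == 7 and v[0] == "#" and all(c in "#0123456789abcdef" for c in v)
--     if k == "ecl":
--         return v in ("amb", "blu", "brn", "gry", "grn", "hzl", "oth")
--     if k == "pid":
--         return len(v) == 9 and all(c in "0123456789" for c in v)
--     return False
--
-- def solve(inp):
--     part1 = part2 = 0
--     for block in inp.split("\n\n"):
--         seen, ok = [], True
--         for tok in reversed(block.split()):
--             k, v = tok.split(":", 1)
--             if k in FIELDS and k not in seen:
--                 seen.append(k)
--                 ok = _valid(k, v) and ok
--         if len(seen) == 7:
--             part1 += 1
--             if ok: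
--                 part2 += 1
--     return part1, part2
-- ===== Notes on version B (the rewrite author's own statement) =====
-- stated objective: alternative
-- what changed: A builds a dict per passport (last occurrence wins) and then runs two record-level counting passes with a 10-entry policy list; B never builds a mapping at all: it scans each block's tokens in REVERSE, takes the first occurrence from the end of each required field (equivalent to dict last-wins), tracks presence as a dedup list of required keys and validity as one running boolean fused into the parse (per-key validator dispatch), then judges the block by len(seen)==7 and the accumulated flag.
import Mathlib
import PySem

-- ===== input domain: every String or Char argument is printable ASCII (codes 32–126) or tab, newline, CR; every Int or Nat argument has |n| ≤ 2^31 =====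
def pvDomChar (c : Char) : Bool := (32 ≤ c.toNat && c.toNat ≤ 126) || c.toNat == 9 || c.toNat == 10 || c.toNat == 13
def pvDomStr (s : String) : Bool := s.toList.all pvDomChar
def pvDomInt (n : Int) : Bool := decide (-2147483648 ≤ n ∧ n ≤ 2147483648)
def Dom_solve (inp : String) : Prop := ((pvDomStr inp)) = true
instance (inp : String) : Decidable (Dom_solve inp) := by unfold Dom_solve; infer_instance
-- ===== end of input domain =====

-- B replaces A's per-passport dict plus two record-level counting passes by a single reverse scan of
-- each block's tokens: first-occurrence-from-the-end per required field (same value as dict last-wins),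
-- presence as a dedup list of required keys, validity as one boolean fused into the parse (A=B on Pre_solve).

-- ===== PORT A =====
def pvPassport (data : String) : PySem.Dict String String :=
  (PySem.Str.split₀ (PySem.Str.replace data "\n" " ")).foldl
    (fun res entry =>
      match PySem.Str.split? entry ":" with
      | some [k, v] => res.insert k v
      | _ => res)  -- a token with not exactly one ':' makes Python raise ValueError; excluded by Pre_solve
    PySem.Dict.empty

def pvInrange (value : String) (lo hi : Int) : Bool :=
  PySem.Str.strIsdigit value &&   -- str.isnumeric, exact on the printable-ASCII domain Dom_solve
    (match PySem.Int.ofStr? value with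
     | some n => decide (lo ≤ n) && decide (n ≤ hi)
     | none => false)

def pvFields : List String := ["byr", "iyr", "eyr", "hgt", "hcl", "ecl", "pid"]

def pvCheck1 (p : PySem.Dict String String) : Bool :=
  pvFields.all (fun field => p.contains field)

def pvCheck2 (e : PySem.Dict String String) : Bool :=
  let policies : List Bool := [
    pvInrange (e.getD "byr" "") 1920 2002,
    pvInrange (e.getD "iyr" "") 2010 2020,
    pvInrange (e.getD "eyr" "") 2020 2030,
    ((PySem.Str.slice (e.getD "hgt" "") (some (-2)) none == "cm")
        && pvInrange (PySem.Str.slice (e.getD "hgt" "") none (some (-2))) 150 193)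
      || ((PySem.Str.slice (e.getD "hgt" "") (some (-2)) none == "in")
        && pvInrange (PySem.Str.slice (e.getD "hgt" "") none (some (-2))) 59 76),
    PySem.Str.pyGet? (e.getD "hcl" "") 0 == some '#',   -- entry["hcl"][0]: the IndexError on "" is excluded by Pre_solve
    PySem.Str.len (e.getD "hcl" "") == 7,
    PySem.Set.issubset (PySem.Set.ofList (e.getD "hcl" "").toList) (PySem.Set.ofList "#0123456789abcdef".toList),
    (PySem.Str.split₀ "amb blu brn gry grn hzl oth").contains (e.getD "ecl" ""),
    PySem.Str.len (e.getD "pid" "") == 9,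
    PySem.Set.issubset (PySem.Set.ofList (e.getD "pid" "").toList) (PySem.Set.ofList "0123456789".toList)]
  policies.all id

def solve (inp : String) : Int × Int :=
  let passports := ((PySem.Str.split? inp "\n\n").getD []).map pvPassport   -- sep ≠ "", so split? is never none
  let part1 := (passports.map (fun x => if pvCheck1 x then (1 : Int) else 0)).sum
  let part2 := (passports.map (fun x => if pvCheck1 x && pvCheck2 x then (1 : Int) else 0)).sum
  (part1, part2)

-- ===== PORT B =====
-- B's FIELDS tuple and _year are A's `fields` list and `inrange` verbatim: their ports pvFields/pvInrange are shared

-- 'c in "…"' on a one-character string c is ported as the substring test PySem.Chars.isIn [c] …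
def pvValid (k v : String) : Bool :=
  if k = "byr" then pvInrange v 1920 2002
  else if k = "iyr" then pvInrange v 2010 2020
  else if k = "eyr" then pvInrange v 2020 2030
  else if k = "hgt" then
    ((PySem.Str.slice v (some (-2)) none == "cm") && pvInrange (PySem.Str.slice v none (some (-2))) 150 193)
      || ((PySem.Str.slice v (some (-2)) none == "in") && pvInrange (PySem.Str.slice v none (some (-2))) 59 76)
  else if k = "hcl" then
    (PySem.Str.len v == 7) && ((PySem.Str.pyGet? v 0 == some '#')
      && v.toList.all (fun c => PySem.Chars.isIn [c] "#0123456789abcdef".toList))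
  else if k = "ecl" then ["amb", "blu", "brn", "gry", "grn", "hzl", "oth"].contains v
  else if k = "pid" then
    (PySem.Str.len v == 9) && v.toList.all (fun c => PySem.Chars.isIn [c] "0123456789".toList)
  else false

-- one step of B's reverse token scan: first occurrence (from the end) of a required field
-- records the key and folds its validity into the running boolean
def pvStep (st : List String × Bool) (tok : String) : List String × Bool :=
  match PySem.Str.splitMax? tok ":" 1 with
  | some [k, v] =>
    if pvFields.contains k && !(st.1.contains k) then
      (st.1 ++ [k], pvValid k v && st.2)
    else st
  | _ => st   -- a token without ':' makes Python raise ValueError; excluded by Pre_solve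

def solve_alt (inp : String) : Int × Int :=
  ((PySem.Str.split? inp "\n\n").getD []).foldl   -- sep ≠ "", so split? is never none
    (fun acc block =>
      let st := (PySem.Str.split₀ block).reverse.foldl pvStep ([], true)
      if st.1.length == 7 then
        if st.2 then (acc.1 + 1, acc.2 + 1) else (acc.1 + 1, acc.2)
      else acc)
    (0, 0)

-- ===== PRECONDITION & SPEC =====
-- Pre_solve excludes exactly the inputs on which Python A raises: a whitespace token with not exactly
-- one ':' (ValueError in `k,v = entry.split(":")`), or a passport carrying all seven fields whose
-- final "hcl" token has an empty value (IndexError in `entry["hcl"][0]`).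
def Pre_solve (inp : String) : Prop :=
  ∀ block ∈ (PySem.Str.split? inp "\n\n").getD [],
    (∀ tok ∈ PySem.Str.split₀ block, tok.toList.count ':' = 1) ∧
    ((∀ f ∈ pvFields, ∃ t ∈ PySem.Str.split₀ block, PySem.Str.startswith t (f ++ ":")) →
      ((PySem.Str.split₀ block).filter (fun t => PySem.Str.startswith t "hcl:")).getLast? ≠ some "hcl:")

instance (inp : String) : Decidable (Pre_solve inp) := by unfold Pre_solve; infer_instance

def pvWitness_solve : String := "byr:1990 iyr:2015\neyr:2025"

def Spec_solve (inp : String) (out : Int × Int) : Prop := out = solve_alt inp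
instance (inp : String) (out : Int × Int) : Decidable (Spec_solve inp out) := by unfold Spec_solve; infer_instance

-- ===== CLAIM (what is proved, stated in full; the proofs are below) =====
def Claim_equal_solve : Prop := ∀ (inp : String), Dom_solve inp → Pre_solve inp → Spec_solve inp (solve inp)

-- ===== LEMMAS AND PROOFS =====

-- proof-side helper: the (key, value) pair of a token, split at its FIRST ':' ((tok, "") when absent)
def pvPartition (s : String) : String × String :=
  match s.toList.findIdx? (fun c => c == ':') with
  | some i => (String.ofList (s.toList.take i), String.ofList (s.toList.drop (i + 1)))
  | none => (s, "")


-- replacing '\n' by ' ' does not change whitespace splitting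
def pvSub (c : Char) : Char := if c = '\n' then ' ' else c

theorem pv_replace_go (l : List Char) (acc : List Char) (fuel : Nat) (h : l.length <= fuel) :
    PySem.Chars.replace.go ['\n'] [' '] fuel l acc = acc.reverse ++ l.map pvSub := by
  induction l generalizing acc fuel with
  | nil =>
    cases fuel <;> simp [PySem.Chars.replace.go]
  | cons c t ih =>
    cases fuel with
    | zero => simp at h
    | succ f =>
      simp only [PySem.Chars.replace.go]
      by_cases hc : c = '\n'
      · subst hc
        simp [List.isPrefixOf, ih _ f (by simpa using h), pvSub]
      · have : ¬ (['\n'].isPrefixOf (c :: t) = true) := by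
          simp [List.isPrefixOf]; intro hh; exact hc (by simpa using hh.symm)
        simp only [this, if_false, Bool.false_eq_true]
        rw [ih _ f (by simpa using h)]
        simp [pvSub, hc]

theorem pv_split0_go (l cur : List Char) (acc : List (List Char)) :
    PySem.Chars.split₀.go (l.map pvSub) cur acc = PySem.Chars.split₀.go l cur acc := by
  induction l generalizing cur acc with
  | nil => simp
  | cons c t ih =>
    have hsp : PySem.Chars.isspace (pvSub c) = PySem.Chars.isspace c := by
      by_cases hc : c = '\n' <;> simp [pvSub, hc] <;> decide
    simp only [List.map_cons, PySem.Chars.split₀.go, hsp]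
    by_cases hs : PySem.Chars.isspace c = true
    · simp [hs, ih]
    · have hc : ¬ c = '\n' := by rintro rfl; exact hs (by decide)
      simp [hs, pvSub, hc, ih]

theorem pv_tokens (s : String) :
    PySem.Str.split₀ (PySem.Str.replace s "\n" " ") = PySem.Str.split₀ s := by
  unfold PySem.Str.split₀
  congr 1
  have h1 : (PySem.Str.replace s "\n" " ").toList = s.toList.map pvSub := by
    rw [PySem.Str.toList_replace]
    show PySem.Chars.replace s.toList ['\n'] [' '] = _
    unfold PySem.Chars.replace
    rw [if_neg (by simp), pv_replace_go _ _ _ (le_refl _)]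
    simp
  rw [h1]
  show PySem.Chars.split₀.go _ [] [] = PySem.Chars.split₀.go _ [] []
  exact pv_split0_go s.toList [] []

theorem pv_splitOn_go_nocolon (l cur : List Char) (acc : List (List Char)) (fuel : Nat)
    (hl : ':' ∉ l) (h : l.length <= fuel) :
    PySem.Chars.splitOn.go [':'] fuel l cur acc = ((cur.reverse ++ l) :: acc).reverse := by
  induction l generalizing cur acc fuel with
  | nil => cases fuel <;> simp [PySem.Chars.splitOn.go]
  | cons c t ih =>
    cases fuel with
    | zero => simp at h
    | succ f =>
      have hc : ¬ ([':'].isPrefixOf (c :: t) = true) := by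
        simp [List.isPrefixOf]
        rintro rfl; exact hl (by simp)
      simp only [PySem.Chars.splitOn.go, hc, Bool.false_eq_true, if_false]
      rw [ih _ _ f (fun hm => hl (List.mem_cons_of_mem _ hm)) (by simpa using h)]
      simp

theorem pv_splitOn_go_colon (a b cur : List Char) (acc : List (List Char)) (fuel : Nat)
    (ha : ':' ∉ a) (hb : ':' ∉ b) (h : a.length + b.length + 1 <= fuel) :
    PySem.Chars.splitOn.go [':'] fuel (a ++ ':' :: b) cur acc = acc.reverse ++ [cur.reverse ++ a, b] := by
  induction a generalizing cur acc fuel with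
  | nil =>
    cases fuel with
    | zero => simp at h
    | succ f =>
      simp only [List.nil_append, PySem.Chars.splitOn.go]
      rw [if_pos (by simp [List.isPrefixOf])]
      simp only [show ([':'] : List Char).length = 1 from rfl, List.drop_succ_cons, List.drop_zero]
      rw [pv_splitOn_go_nocolon b [] _ f hb (by simpa using h)]
      simp
  | cons c a' ih =>
    cases fuel with
    | zero => simp at h
    | succ f =>
      have hc : ¬ ([':'].isPrefixOf (c :: (a' ++ ':' :: b)) = true) := by
        simp [List.isPrefixOf]
        rintro rfl; exact ha (by simp)
      simp only [List.cons_append, PySem.Chars.splitOn.go, hc, Bool.false_eq_true, if_false]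
      rw [ih _ _ f (fun hm => ha (List.mem_cons_of_mem _ hm)) (by simp at h ⊢; omega)]
      simp

theorem pv_decomp (t : List Char) (h : t.count ':' = 1) :
    ∃ a b, t = a ++ ':' :: b ∧ ':' ∉ a ∧ ':' ∉ b := by
  induction t with
  | nil => simp at h
  | cons c t ih =>
    by_cases hc : c = ':'
    · subst hc
      refine ⟨[], t, by simp, by simp, ?_⟩
      rw [List.count_cons_self] at h
      simpa using List.count_eq_zero.mp (by omega)
    · rw [List.count_cons_of_ne (by simpa using hc)] at h
      obtain ⟨a, b, rfl, ha, hb⟩ := ih h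
      exact ⟨c :: a, b, by simp, by simp [ha]; exact fun e => hc e.symm, hb⟩

theorem pv_findIdx_colon (a b : List Char) (ha : ':' ∉ a) :
    (a ++ ':' :: b).findIdx? (fun c => c == ':') = some a.length := by
  induction a with
  | nil => simp [List.findIdx?_cons]
  | cons c t ih =>
    have hc : ¬ (c == ':') = true := by simp; rintro rfl; exact ha (by simp)
    simp only [List.cons_append, List.findIdx?_cons, hc, if_false, Bool.false_eq_true]
    rw [ih (fun hm => ha (List.mem_cons_of_mem _ hm))]
    simp

-- under Pre_ (exactly one ':'), A's entry.split(":") and B's partition agree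
theorem pv_kv (tok : String) (h : tok.toList.count ':' = 1) :
    PySem.Str.split? tok ":" = some [(pvPartition tok).1, (pvPartition tok).2] := by
  obtain ⟨a, b, ht, ha, hb⟩ := pv_decomp tok.toList h
  have hpart : pvPartition tok = (String.ofList a, String.ofList b) := by
    unfold pvPartition
    rw [ht, pv_findIdx_colon a b ha]
    simp [List.drop_append]
  rw [hpart]
  unfold PySem.Str.split? PySem.Chars.split?
  rw [if_neg (by simp)]
  show Option.map _ (some (PySem.Chars.splitOn tok.toList [':'])) = _
  unfold PySem.Chars.splitOn
  rw [ht, pv_splitOn_go_colon a b [] [] _ ha hb (by simp)]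
  simp

theorem pv_splitOnMax_go_zero (fuel : Nat) (l cur : List Char) (acc : List (List Char)) :
    PySem.Chars.splitOnMax.go [':'] fuel 0 l cur acc = ((cur.reverse ++ l) :: acc).reverse := by
  cases fuel with
  | zero => simp [PySem.Chars.splitOnMax.go]
  | succ f => cases l <;> simp [PySem.Chars.splitOnMax.go]

theorem pv_splitOnMax_go_colon (a b cur : List Char) (acc : List (List Char)) (fuel : Nat)
    (ha : ':' ∉ a) (h : a.length + 1 <= fuel) :
    PySem.Chars.splitOnMax.go [':'] fuel 1 (a ++ ':' :: b) cur acc = acc.reverse ++ [cur.reverse ++ a, b] := by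
  induction a generalizing cur acc fuel with
  | nil =>
    cases fuel with
    | zero => simp at h
    | succ f =>
      simp only [List.nil_append, PySem.Chars.splitOnMax.go]
      rw [if_neg (by omega), if_pos (by simp [List.isPrefixOf])]
      simp only [show ([':'] : List Char).length = 1 from rfl, List.drop_succ_cons, List.drop_zero]
      rw [pv_splitOnMax_go_zero f b [] _]
      simp
  | cons c a' ih =>
    cases fuel with
    | zero => simp at h
    | succ f =>
      have hc : ¬ ([':'].isPrefixOf (c :: (a' ++ ':' :: b)) = true) := by
        simp [List.isPrefixOf]
        rintro rfl; exact ha (by simp)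
      simp only [List.cons_append, PySem.Chars.splitOnMax.go, hc, Bool.false_eq_true, if_false]
      rw [if_neg (by omega)]
      rw [ih _ _ f (fun hm => ha (List.mem_cons_of_mem _ hm)) (by simp at h ⊢; omega)]
      simp

-- under Pre_ (exactly one ':'), B's tok.split(":", 1) is the partition pair
theorem pv_kv2 (tok : String) (h : tok.toList.count ':' = 1) :
    PySem.Str.splitMax? tok ":" 1 = some [(pvPartition tok).1, (pvPartition tok).2] := by
  obtain ⟨a, b, ht, ha, hb⟩ := pv_decomp tok.toList h
  have hpart : pvPartition tok = (String.ofList a, String.ofList b) := by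
    unfold pvPartition
    rw [ht, pv_findIdx_colon a b ha]
    simp [List.drop_append]
  rw [hpart]
  unfold PySem.Str.splitMax? PySem.Chars.splitMax?
  rw [if_neg (by decide)]
  show Option.map _ (some (PySem.Chars.splitOnMax.go [':'] (tok.toList.length + 1) (1 : Int).toNat tok.toList [] [])) = _
  rw [show ((1 : Int).toNat) = 1 from rfl, ht,
      pv_splitOnMax_go_colon a b [] [] _ ha (by simp)]
  simp

-- the value B's reverse scan picks for a key = the last occurrence in the token list
def pvLastVal (toks : List String) (f : String) : String :=
  toks.foldl (fun acc t => if (pvPartition t).1 = f then (pvPartition t).2 else acc) ""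

theorem pv_lastval_concat (l : List String) (t : String) (f : String) :
    pvLastVal (l ++ [t]) f
      = if (pvPartition t).1 = f then (pvPartition t).2 else pvLastVal l f := by
  unfold pvLastVal
  rw [List.foldl_append]
  rfl

theorem pv_dictA (toks : List String) (h : ∀ t ∈ toks, t.toList.count ':' = 1) :
    (∀ f, (toks.foldl (fun res entry =>
        match PySem.Str.split? entry ":" with
        | some [k, v] => res.insert k v
        | _ => res) PySem.Dict.empty).contains f
          = toks.any (fun t => (pvPartition t).1 == f)) ∧
    (∀ f, (toks.foldl (fun res entry =>
        match PySem.Str.split? entry ":" with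
        | some [k, v] => res.insert k v
        | _ => res) PySem.Dict.empty).getD f "" = pvLastVal toks f) := by
  induction toks using List.reverseRecOn with
  | nil => constructor <;> intro f <;> simp [pvLastVal, PySem.Dict.contains_empty, PySem.Dict.getD_empty]
  | append_singleton l t ih =>
    obtain ⟨ih1, ih2⟩ := ih (fun s hs => h s (by simp [hs]))
    have ht := pv_kv t (h t (by simp))
    constructor <;> intro f <;>
      rw [List.foldl_append, List.foldl_cons, List.foldl_nil, ht]
    · rw [PySem.Dict.contains_insert, ih1, List.any_append]
      simp [Bool.or_comm, BEq.comm]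
    · rw [PySem.Dict.getD_insert, ih2, pv_lastval_concat]
      by_cases hf : f = (pvPartition t).1
      · simp [hf]
      · rw [if_neg hf, if_neg (fun e => hf e.symm)]

theorem pv_lastval_foldl (toks : List String) (f c : String) :
    toks.foldl (fun acc t => if (pvPartition t).1 = f then (pvPartition t).2 else acc) c
      = if toks.any (fun t => (pvPartition t).1 == f) then pvLastVal toks f else c := by
  induction toks generalizing c with
  | nil => simp
  | cons t r ih =>
    rw [List.foldl_cons, ih]
    by_cases hr : r.any (fun s => (pvPartition s).1 == f) = true
    · have h1 : pvLastVal (t :: r) f = pvLastVal r f := by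
        unfold pvLastVal
        rw [List.foldl_cons, ih, if_pos hr]
        rfl
      have hr2 : ((t :: r).any fun s => (pvPartition s).1 == f) = true := by
        rw [List.any_cons, hr, Bool.or_true]
      rw [if_pos hr, hr2, if_pos rfl, h1]
    · by_cases hk : (pvPartition t).1 = f
      · have h1 : pvLastVal (t :: r) f = (pvPartition t).2 := by
          unfold pvLastVal
          rw [List.foldl_cons, ih]
          simp [hr, hk]
        simp [hr, hk, h1]
      · simp [hr, hk]

theorem pv_lastval_cons (t : String) (r : List String) (f : String) :
    pvLastVal (t :: r) f
      = if r.any (fun s => (pvPartition s).1 == f) then pvLastVal r f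
        else (if (pvPartition t).1 = f then (pvPartition t).2 else "") := by
  unfold pvLastVal
  rw [List.foldl_cons, pv_lastval_foldl]
  rfl

theorem pv_all_congr_mem (l l' : List String) (p : String → Bool)
    (h : ∀ f, f ∈ l ↔ f ∈ l') : l.all p = l'.all p := by
  rw [Bool.eq_iff_iff]
  simp only [List.all_eq_true]
  exact ⟨fun hh x hx => hh x ((h x).mpr hx), fun hh x hx => hh x ((h x).mp hx)⟩

theorem pv_all_lastval (t : String) (r : List String) (l : List String)
    (hmem : ∀ x ∈ l, (r.any fun s => (pvPartition s).1 == x) = true) :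
    l.all (fun f => pvValid f (pvLastVal (t :: r) f))
      = l.all (fun f => pvValid f (pvLastVal r f)) := by
  rw [Bool.eq_iff_iff]
  simp only [List.all_eq_true]
  constructor
  · intro hh x hx
    have hl : pvLastVal (t :: r) x = pvLastVal r x := by
      rw [pv_lastval_cons, if_pos (hmem x hx)]
    rw [← hl]; exact hh x hx
  · intro hh x hx
    have hl : pvLastVal (t :: r) x = pvLastVal r x := by
      rw [pv_lastval_cons, if_pos (hmem x hx)]
    rw [hl]; exact hh x hx

theorem pv_Binv (toks : List String) (hc1 : ∀ t ∈ toks, t.toList.count ':' = 1) :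
    (toks.reverse.foldl pvStep ([], true)).1.Nodup ∧
    (∀ f, f ∈ (toks.reverse.foldl pvStep ([], true)).1
        ↔ f ∈ pvFields ∧ toks.any (fun t => (pvPartition t).1 == f) = true) ∧
    (toks.reverse.foldl pvStep ([], true)).2
      = (toks.reverse.foldl pvStep ([], true)).1.all (fun f => pvValid f (pvLastVal toks f)) := by
  induction toks with
  | nil => simp
  | cons t r ih =>
    obtain ⟨ih1, ih2, ih3⟩ := ih (fun s hs => hc1 s (by simp [hs]))
    have hgoal : (t :: r).reverse.foldl pvStep ([], true)
        = pvStep (r.reverse.foldl pvStep ([], true)) t := by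
      rw [List.reverse_cons, List.foldl_append, List.foldl_cons, List.foldl_nil]
    rw [hgoal]
    set st := r.reverse.foldl pvStep ([], true) with hst
    unfold pvStep
    simp only [pv_kv2 t (hc1 t (by simp))]
    have hanyk : ((t :: r).any fun s => (pvPartition s).1 == (pvPartition t).1) = true := by
      simp [List.any_cons]
    have hanyne : ∀ f, ¬ f = (pvPartition t).1 →
        ((t :: r).any fun s => (pvPartition s).1 == f)
          = (r.any fun s => (pvPartition s).1 == f) := by
      intro f hf
      rw [List.any_cons, beq_eq_false_iff_ne.mpr (fun e => hf e.symm), Bool.false_or]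
    by_cases hcond : (pvFields.contains (pvPartition t).1 && !(st.1.contains (pvPartition t).1)) = true
    · rw [if_pos hcond]
      simp only [Bool.and_eq_true, Bool.not_eq_true', List.contains_eq_mem, decide_eq_false_iff_not] at hcond
      obtain ⟨hkf, hkn⟩ := hcond
      have hkf' : (pvPartition t).1 ∈ pvFields := by simpa using hkf
      have hkr : ¬ (r.any fun s => (pvPartition s).1 == (pvPartition t).1) = true := by
        intro hr
        exact hkn ((ih2 _).mpr ⟨hkf', hr⟩)
      refine ⟨?_, fun f => ?_, ?_⟩
      · simp [List.nodup_append, ih1]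
        intro a ha e
        exact hkn (e ▸ ha)
      · by_cases hf : f = (pvPartition t).1
        · subst hf
          simp [hkf', hanyk]
        · rw [hanyne f hf]
          simp only [List.mem_append, List.mem_singleton, hf, or_false]
          exact ih2 f
      · rw [List.all_append, List.all_cons, List.all_nil]
        have h1 : pvLastVal (t :: r) (pvPartition t).1 = (pvPartition t).2 := by
          rw [pv_lastval_cons, if_neg hkr, if_pos rfl]
        have h2 : st.1.all (fun f => pvValid f (pvLastVal (t :: r) f))
            = st.1.all (fun f => pvValid f (pvLastVal r f)) :=
          pv_all_lastval t r st.1 (fun x hx => ((ih2 x).mp hx).2)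
        rw [h1, h2, ← ih3]
        cases st.2 <;> cases pvValid (pvPartition t).1 (pvPartition t).2 <;> simp
    · rw [if_neg hcond]
      simp only [Bool.and_eq_true, Bool.not_eq_true', List.contains_eq_mem, decide_eq_false_iff_not, not_and] at hcond
      refine ⟨ih1, fun f => ?_, ?_⟩
      · by_cases hf : f = (pvPartition t).1
        · subst hf
          constructor
          · intro hin
            exact ⟨((ih2 _).mp hin).1, hanyk⟩
          · rintro ⟨hkf, -⟩
            by_cases hin : (pvPartition t).1 ∈ st.1
            · exact hin
            · exact absurd (by simpa using fun hc => hin (by simpa using hcond hc))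
                (by simp [hkf])
          -- fallback handled above
        · rw [hanyne f hf]
          exact ih2 f
      · rw [ih3]
        exact (pv_all_lastval t r st.1 (fun x hx => ((ih2 x).mp hx).2)).symm

theorem pv_subset_eq_all (l m : List Char) :
    PySem.Set.issubset (PySem.Set.ofList l) (PySem.Set.ofList m)
      = l.all (fun c => PySem.Chars.isIn [c] m) := by
  rw [Bool.eq_iff_iff]
  simp [PySem.Set.issubset_iff, PySem.Set.mem_ofList, List.all_eq_true,
        PySem.Chars.isIn_iff_infix, List.singleton_infix_iff]

theorem pv_ecl_eq :
    PySem.Str.split₀ "amb blu brn gry grn hzl oth" = ["amb", "blu", "brn", "gry", "grn", "hzl", "oth"] := by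
  decide

theorem pv_and_shuffle (x1 x2 x3 x4 hh hl hs e pl ps : Bool) :
    (x1 && (x2 && (x3 && (x4 && ((hl && (hh && hs)) && (e && ((pl && ps) && true)))))))
      = (x1 && (x2 && (x3 && (x4 && (hh && (hl && (hs && (e && (pl && (ps && true)))))))))) := by
  revert x1 x2 x3 x4 hh hl hs e pl ps
  decide

set_option maxHeartbeats 1000000 in
theorem pv_valid_check2 (d : PySem.Dict String String) (g : String → String)
    (hg : ∀ f ∈ pvFields, d.getD f "" = g f) :
    pvFields.all (fun f => pvValid f (g f)) = pvCheck2 d := by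
  have h1 := hg "byr" (by simp [pvFields])
  have h2 := hg "iyr" (by simp [pvFields])
  have h3 := hg "eyr" (by simp [pvFields])
  have h4 := hg "hgt" (by simp [pvFields])
  have h5 := hg "hcl" (by simp [pvFields])
  have h6 := hg "ecl" (by simp [pvFields])
  have h7 := hg "pid" (by simp [pvFields])
  have hv1 : pvValid "byr" (g "byr") = pvInrange (g "byr") 1920 2002 := by simp [pvValid]
  have hv2 : pvValid "iyr" (g "iyr") = pvInrange (g "iyr") 2010 2020 := by simp [pvValid]
  have hv3 : pvValid "eyr" (g "eyr") = pvInrange (g "eyr") 2020 2030 := by simp [pvValid]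
  have hv4 : pvValid "hgt" (g "hgt")
      = (((PySem.Str.slice (g "hgt") (some (-2)) none == "cm")
            && pvInrange (PySem.Str.slice (g "hgt") none (some (-2))) 150 193)
          || ((PySem.Str.slice (g "hgt") (some (-2)) none == "in")
            && pvInrange (PySem.Str.slice (g "hgt") none (some (-2))) 59 76)) := by
    simp [pvValid]
  have hv5 : pvValid "hcl" (g "hcl")
      = ((PySem.Str.len (g "hcl") == 7) && ((PySem.Str.pyGet? (g "hcl") 0 == some '#')
          && (g "hcl").toList.all (fun c => PySem.Chars.isIn [c] "#0123456789abcdef".toList))) := by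
    simp [pvValid]
  have hv6 : pvValid "ecl" (g "ecl")
      = ["amb", "blu", "brn", "gry", "grn", "hzl", "oth"].contains (g "ecl") := by
    simp [pvValid]
  have hv7 : pvValid "pid" (g "pid")
      = ((PySem.Str.len (g "pid") == 9)
          && (g "pid").toList.all (fun c => PySem.Chars.isIn [c] "0123456789".toList)) := by
    simp [pvValid]
  unfold pvCheck2
  rw [h1, h2, h3, h4, h5, h6, h7]
  show (["byr", "iyr", "eyr", "hgt", "hcl", "ecl", "pid"].all (fun f => pvValid f (g f))) = _
  simp only [List.all_cons, List.all_nil, id_eq, hv1, hv2, hv3, hv4, hv5, hv6, hv7,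
             pv_subset_eq_all, pv_ecl_eq]
  exact pv_and_shuffle _ _ _ _ _ _ _ _ _ _

theorem pv_block (block : String) (h : ∀ t ∈ PySem.Str.split₀ block, t.toList.count ':' = 1) :
    ((((PySem.Str.split₀ block).reverse.foldl pvStep ([], true)).1.length == 7)
        = pvCheck1 (pvPassport block)) ∧
    (((((PySem.Str.split₀ block).reverse.foldl pvStep ([], true)).1.length == 7)
        && ((PySem.Str.split₀ block).reverse.foldl pvStep ([], true)).2)
      = (pvCheck1 (pvPassport block) && pvCheck2 (pvPassport block))) := by
  obtain ⟨hnd, hmem, hok⟩ := pv_Binv (PySem.Str.split₀ block) h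
  set toks := PySem.Str.split₀ block with htk
  set st := toks.reverse.foldl pvStep ([], true) with hst
  obtain ⟨hd1, hd2⟩ := pv_dictA toks h
  have hpass : pvPassport block = toks.foldl (fun res entry =>
      match PySem.Str.split? entry ":" with
      | some [k, v] => res.insert k v
      | _ => res) PySem.Dict.empty := by
    unfold pvPassport
    rw [pv_tokens]
  have hcheck1 : pvCheck1 (pvPassport block)
      = pvFields.all (fun f => toks.any (fun t => (pvPartition t).1 == f)) := by
    unfold pvCheck1
    rw [hpass]
    congr 1
    funext f
    exact hd1 f
  have hperm : st.1.Perm (pvFields.filter (fun f => toks.any (fun t => (pvPartition t).1 == f))) := by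
    apply (List.perm_ext_iff_of_nodup hnd (List.Nodup.filter _ (by decide))).mpr
    intro f
    rw [List.mem_filter, hmem f]
  have hlen : (st.1.length == 7)
      = pvFields.all (fun f => toks.any (fun t => (pvPartition t).1 == f)) := by
    rw [Bool.eq_iff_iff, beq_iff_eq, hperm.length_eq, List.all_eq_true]
    constructor
    · intro h7 f hf
      have hfe : pvFields.filter (fun f => toks.any (fun t => (pvPartition t).1 == f)) = pvFields :=
        List.Sublist.eq_of_length List.filter_sublist h7
      exact List.filter_eq_self.mp hfe f hf
    · intro hall
      rw [List.filter_eq_self.mpr hall]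
      rfl
  refine ⟨by rw [hlen, hcheck1], ?_⟩
  by_cases hc1 : pvCheck1 (pvPassport block) = true
  · have hall : pvFields.all (fun f => toks.any (fun t => (pvPartition t).1 == f)) = true := by
      rw [← hcheck1]; exact hc1
    have hl : (st.1.length == 7) = true := by rw [hlen]; exact hall
    rw [hl, hc1, Bool.true_and, Bool.true_and, hok]
    have hmem' : ∀ x, x ∈ st.1 ↔ x ∈ pvFields := by
      intro x
      rw [hmem x]
      constructor
      · exact fun hx => hx.1
      · intro hx
        exact ⟨hx, List.all_eq_true.mp hall x hx⟩
    rw [pv_all_congr_mem st.1 pvFields _ hmem', hpass]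
    exact pv_valid_check2 _ (pvLastVal toks) (fun f _ => hd2 f)
  · have hc1' : pvCheck1 (pvPassport block) = false := by
      revert hc1
      cases pvCheck1 (pvPassport block) <;> simp
    have hl : (st.1.length == 7) = false := by
      rw [hlen, ← hcheck1, hc1']
    rw [hl, hc1']
    simp

theorem pv_count (bs : List String)
    (h : ∀ block ∈ bs, ∀ tok ∈ PySem.Str.split₀ block, tok.toList.count ':' = 1) :
    bs.foldl (fun acc block =>
      let st := (PySem.Str.split₀ block).reverse.foldl pvStep ([], true)
      if st.1.length == 7 then
        if st.2 then (acc.1 + 1, acc.2 + 1) else (acc.1 + 1, acc.2)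
      else acc) ((0 : Int), (0 : Int))
    = ((bs.map (fun b => if pvCheck1 (pvPassport b) then (1 : Int) else 0)).sum,
       (bs.map (fun b => if pvCheck1 (pvPassport b) && pvCheck2 (pvPassport b) then (1 : Int) else 0)).sum) := by
  refine Eq.trans (PySem.List.foldl_congr_mem _ _ (fun acc block =>
      ((acc.1 + if pvCheck1 (pvPassport block) then (1 : Int) else 0),
       (acc.2 + if pvCheck1 (pvPassport block) && pvCheck2 (pvPassport block) then (1 : Int) else 0))) _
      (fun acc block hb => ?_)) ?_
  · obtain ⟨e1, e2⟩ := pv_block block (h block hb)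
    simp only
    by_cases h1 : pvCheck1 (pvPassport block) = true
    · have hl : (((PySem.Str.split₀ block).reverse.foldl pvStep ([], true)).1.length == 7) = true := by
        rw [e1, h1]
      rw [e1, h1] at e2
      simp only [Bool.true_and] at e2
      by_cases h2 : pvCheck2 (pvPassport block) = true
      · rw [hl, if_pos rfl, e2, h2, if_pos rfl]
        simp [h1]
      · simp only [Bool.not_eq_true] at h2
        rw [hl, if_pos rfl, e2, h2]
        simp [h1]
    · simp only [Bool.not_eq_true] at h1
      have hl : (((PySem.Str.split₀ block).reverse.foldl pvStep ([], true)).1.length == 7) = false := by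
        rw [e1, h1]
      rw [hl]
      simp [h1]
  · rw [PySem.List.foldl_prod_mk
      (f := fun s b => s + if pvCheck1 (pvPassport b) then (1 : Int) else 0)
      (g := fun s b => s + if pvCheck1 (pvPassport b) && pvCheck2 (pvPassport b) then (1 : Int) else 0)]
    rw [PySem.List.foldl_add, PySem.List.foldl_add]
    simp

-- ===== VERDICT (by name: the statement is the Claim_ definition above) =====
theorem solve_spec : Claim_equal_solve := by
  intro inp _ hpre
  unfold Spec_solve solve solve_alt
  rw [pv_count _ (fun b hb => (hpre b hb).1)]
  simp [List.map_map, Function.comp_def]
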